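-- pv_equiv track=rewrite | github.com/finaiized/advent-of-code | 2017/day9.py | stream_score
-- ===== SOURCE A (Python) =====
-- def stream_score(input_str):
--     total_score = 0
--     group_score = 0
--     in_garbage = False
--     next_token_cancelled = False
--
--     for char in input_str:
--         if next_token_cancelled:
--             next_token_cancelled = False
--             continue
--
--         if char == '!':
--             next_token_cancelled = True
--         elif char == '<':
--             in_garbage = True
--         elif char == '>':
--             in_garbage = False
--         elif not in_garbage:
--             if char == '{':
--                 group_score += 1
--             elif char == '}':
--                 total_score += group_score
--                 group_score -= 1
--
--     return total_score
-- ===== SOURCE B (Python) =====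
-- def stream_score(input_str):
--     # pass 1: drop every '!'-cancelled pair
--     chars = []
--     i = 0
--     n = len(input_str)
--     while i < n:
--         if input_str[i] == '!':
--             i += 2
--         else:
--             chars.append(input_str[i])
--             i += 1
--     # pass 2: drop garbage segments '<'...'>' (unclosed runs to end)
--     clean = []
--     it = iter(chars)
--     for c in it:
--         if c == '<':
--             for d in it:
--                 if d == '>':
--                     break
--         else:
--             clean.append(c)
--     # pass 3: depth count
--     total = 0
--     depth = 0
--     for c in clean:
--         if c == '{':
--             depth += 1
--         elif c == '}':
--             total += depth
--             depth -= 1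
--     return total
-- ===== Notes on version B (the rewrite author's own statement) =====
-- stated objective: alternative
-- what changed: Replaces A's single-pass state machine with four state variables by three independent passes: first strip cancelled character pairs, then strip garbage segments, then a plain depth-counting scan over the cleaned stream.
import Mathlib
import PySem

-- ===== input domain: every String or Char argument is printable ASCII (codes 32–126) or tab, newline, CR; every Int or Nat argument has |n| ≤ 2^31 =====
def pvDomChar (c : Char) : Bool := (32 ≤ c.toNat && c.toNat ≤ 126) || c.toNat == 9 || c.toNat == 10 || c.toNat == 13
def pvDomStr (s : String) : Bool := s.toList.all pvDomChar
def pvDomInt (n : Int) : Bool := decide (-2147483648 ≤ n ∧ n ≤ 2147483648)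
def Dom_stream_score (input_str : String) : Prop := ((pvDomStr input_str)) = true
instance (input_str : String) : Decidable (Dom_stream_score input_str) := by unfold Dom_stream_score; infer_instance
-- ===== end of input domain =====

set_option maxHeartbeats 1600000


-- B re-implements A's one-pass four-flag state machine as three simple passes
-- (strip cancelled pairs, strip garbage, count depth); objective: simpler, no speed claim.

-- ===== PORT A =====
-- single loop over the characters with state (total, group, in_garbage, next_token_cancelled)
def aLoop : List Char → Int → Int → Bool → Bool → Int
  | [], total, _, _, _ => total
  | c :: rest, total, group, gar, canc =>
    if canc then aLoop rest total group gar false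
    else if c = '!' then aLoop rest total group gar true
    else if c = '<' then aLoop rest total group true canc
    else if c = '>' then aLoop rest total group false canc
    else if !gar then
      (if c = '{' then aLoop rest total (group + 1) gar canc
       else if c = '}' then aLoop rest (total + group) (group - 1) gar canc
       else aLoop rest total group gar canc)
    else aLoop rest total group gar canc

def stream_score (input_str : String) : Int :=
  aLoop input_str.toList 0 0 false false

-- ===== PORT B =====
-- pass 1: drop '!'-cancelled pairs (i += 2 on '!', else keep and i += 1)
def dropCancelled : List Char → List Char
  | [] => []
  | [c] => if c = '!' then [] else [c]
  | c :: d :: rest =>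
    if c = '!' then dropCancelled rest else c :: dropCancelled (d :: rest)

-- pass 2 inner loop: consume garbage up to and including the first '>'
def skipGarbage : List Char → List Char
  | [] => []
  | d :: rest => if d = '>' then rest else skipGarbage rest

theorem skipGarbage_length_le : ∀ (l : List Char), (skipGarbage l).length ≤ l.length := by
  intro l
  induction l with
  | nil => simp [skipGarbage]
  | cons d rest ih =>
    simp only [skipGarbage]
    split
    · simp
    · simp only [List.length_cons]; omega

-- pass 2: drop garbage segments
def dropGarbage : List Char → List Char
  | [] => []
  | c :: rest =>
    if c = '<' then dropGarbage (skipGarbage rest) else c :: dropGarbage rest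
termination_by l => l.length
decreasing_by
  · exact Nat.lt_succ_of_le (skipGarbage_length_le rest)
  · simp

-- pass 3: depth count
def countLoop : List Char → Int → Int → Int
  | [], total, _ => total
  | c :: rest, total, depth =>
    if c = '{' then countLoop rest total (depth + 1)
    else if c = '}' then countLoop rest (total + depth) (depth - 1)
    else countLoop rest total depth

def stream_score_alt (input_str : String) : Int :=
  countLoop (dropGarbage (dropCancelled input_str.toList)) 0 0

-- ===== PRECONDITION & SPEC =====
def Spec_stream_score (input_str : String) (out : Int) : Prop := out = stream_score_alt input_str
instance (input_str : String) (out : Int) : Decidable (Spec_stream_score input_str out) := by unfold Spec_stream_score; infer_instance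

-- ===== CLAIM (what is proved, stated in full; the proofs are below) =====
def Claim_equal_stream_score : Prop := ∀ (input_str : String), Dom_stream_score input_str → Spec_stream_score input_str (stream_score input_str)

-- ===== LEMMAS AND PROOFS =====

-- A's machine without the cancellation flag (proof-only helper)
def aNC : List Char → Int → Int → Bool → Int
  | [], total, _, _ => total
  | c :: rest, total, group, gar =>
    if c = '<' then aNC rest total group true
    else if c = '>' then aNC rest total group false
    else if !gar then
      (if c = '{' then aNC rest total (group + 1) gar
       else if c = '}' then aNC rest (total + group) (group - 1) gar
       else aNC rest total group gar)
    else aNC rest total group gar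

-- cancellation pass: A with canc = false equals the cancel-free machine on dropCancelled
theorem aLoop_aNC_step (c : Char) (l l' : List Char) (hc : c ≠ '!')
    (H : ∀ t g gar, aLoop l t g gar false = aNC l' t g gar) :
    ∀ (t g : Int) (gar : Bool), aLoop (c :: l) t g gar false = aNC (c :: l') t g gar := by
  intro t g gar
  simp only [aLoop, aNC, Bool.false_eq_true, if_false, if_neg hc]
  cases gar <;> by_cases h1 : c = '<' <;> by_cases h2 : c = '>' <;>
    by_cases h3 : c = '{' <;> by_cases h4 : c = '}' <;> simp_all

theorem aLoop_dropCancelled :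
    ∀ (l : List Char) (t g : Int) (gar : Bool),
      aLoop l t g gar false = aNC (dropCancelled l) t g gar := by
  intro l
  induction l using dropCancelled.induct with
  | case1 => intro t g gar; simp [aLoop, dropCancelled, aNC]
  | case2 => intro t g gar; simp [aLoop, dropCancelled, aNC]
  | case3 c hc =>
    intro t g gar
    rw [show dropCancelled [c] = [c] from by simp [dropCancelled, hc]]
    exact aLoop_aNC_step c [] [] hc (fun _ _ _ => rfl) t g gar
  | case4 d rest ih =>
    intro t g gar
    rw [show dropCancelled ('!' :: d :: rest) = dropCancelled rest from by
          simp only [dropCancelled, reduceIte],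
        show aLoop ('!' :: d :: rest) t g gar false = aLoop rest t g gar false from by
          simp only [aLoop, reduceIte, Bool.false_eq_true, if_false]]
    exact ih t g gar
  | case5 c d rest hc ih =>
    intro t g gar
    rw [show dropCancelled (c :: d :: rest) = c :: dropCancelled (d :: rest) from by
          simp [dropCancelled, hc]]
    exact aLoop_aNC_step c (d :: rest) (dropCancelled (d :: rest)) hc ih t g gar

-- inside garbage, the cancel-free machine just consumes up to the first '>'
theorem aNC_garbage :
    ∀ (l : List Char) (t g : Int),
      aNC l t g true = aNC (skipGarbage l) t g false := by
  intro l
  induction l with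
  | nil => intro t g; simp [skipGarbage, aNC]
  | cons d rest ih =>
    intro t g
    by_cases hd : d = '>'
    · simp [aNC, skipGarbage, hd]
    · by_cases hl : d = '<' <;> simp [aNC, skipGarbage, hd, hl, ih]

-- outside garbage, the cancel-free machine is depth counting on dropGarbage
theorem aNC_dropGarbage :
    ∀ (l : List Char) (t g : Int),
      aNC l t g false = countLoop (dropGarbage l) t g := by
  intro l
  induction l using dropGarbage.induct with
  | case1 => intro t g; simp [aNC, dropGarbage, countLoop]
  | case2 rest ih =>
    intro t g
    simp [aNC, dropGarbage, aNC_garbage, ih]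
  | case3 c rest hc ih =>
    intro t g
    by_cases hr : c = '>'
    · simp [aNC, dropGarbage, countLoop, hr, ih]
    · simp only [aNC, dropGarbage, hc, hr, if_false, Bool.not_false, if_true]
      split_ifs <;> simp_all [countLoop]

-- ===== VERDICT (by name: the statement is the Claim_ definition above) =====
theorem stream_score_spec : Claim_equal_stream_score := by
  intro s _
  unfold Spec_stream_score stream_score stream_score_alt
  rw [aLoop_dropCancelled, aNC_dropGarbage]
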